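-- pv_equiv track=rewrite | github.com/yeonjii/Algorithm-Study | ziuge/Programmers/7의 개수.py | solution
-- ===== SOURCE A (Python) =====
-- def solution(array):
--     s_list = []
--     for i in array:
--         s_list.append(str(i))
--     answer = 0
--     for i in s_list:
--         answer += i.count("7")
--
--     return answer
-- ===== SOURCE B (Python) =====
-- def solution(array):
--     total = 0
--     for x in array:
--         n = abs(x)
--         while n > 0:
--             if n % 10 == 7:
--                 total += 1
--             n //= 10
--     return total
-- ===== Notes on version B (the rewrite author's own statement) =====
-- stated objective: alternative
-- what changed: Replaces A's string-based pipeline (stringify every element, count '7' characters) with pure integer arithmetic: a while-loop extracting decimal digits of |x| via %10 and //10 and counting those equal to 7, no strings at all.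
import Mathlib
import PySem

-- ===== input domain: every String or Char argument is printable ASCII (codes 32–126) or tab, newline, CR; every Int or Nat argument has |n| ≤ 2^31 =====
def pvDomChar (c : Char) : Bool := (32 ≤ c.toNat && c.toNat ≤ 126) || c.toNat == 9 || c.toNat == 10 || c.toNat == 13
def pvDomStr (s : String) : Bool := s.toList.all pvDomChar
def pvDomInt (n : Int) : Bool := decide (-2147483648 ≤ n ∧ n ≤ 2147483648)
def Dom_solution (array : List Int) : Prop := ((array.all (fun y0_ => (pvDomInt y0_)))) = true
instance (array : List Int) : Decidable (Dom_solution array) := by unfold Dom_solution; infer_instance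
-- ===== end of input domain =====

-- B replaces A's string pipeline with pure integer arithmetic: for each element it extracts
-- the decimal digits of |x| with %10 and //10 and counts those equal to 7 (no strings).

-- ===== PORT A =====
def solution (array : List Int) : Int :=
  -- s_list = []; for i in array: s_list.append(str(i))
  let s_list := array.foldl (fun acc i => acc ++ [PySem.Int.toStr i]) []
  -- answer = 0; for i in s_list: answer += i.count("7")
  s_list.foldl (fun answer i => answer + (PySem.Str.count i "7" : Int)) 0

-- ===== PORT B =====
-- the inner 'while n > 0: if n % 10 == 7: total += 1; n //= 10'
def count7Loop (n : Nat) (total : Int) : Int :=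
  if n = 0 then total
  else count7Loop (n / 10) (if n % 10 = 7 then total + 1 else total)
termination_by n
decreasing_by exact Nat.div_lt_self (Nat.pos_of_ne_zero (by assumption)) (by norm_num)

def solution_alt (array : List Int) : Int :=
  -- total = 0; for x in array: n = abs(x); while-loop
  array.foldl (fun total x => count7Loop x.natAbs total) 0

-- ===== PRECONDITION & SPEC =====
def Spec_solution (array : List Int) (out : Int) : Prop := out = solution_alt array
instance (array : List Int) (out : Int) : Decidable (Spec_solution array out) := by unfold Spec_solution; infer_instance

-- ===== CLAIM (what is proved, stated in full; the proofs are below) =====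
def Claim_equal_solution : Prop := ∀ (array : List Int), Dom_solution array → Spec_solution array (solution array)

-- ===== LEMMAS AND PROOFS =====

-- one-step unfolding of the while-loop
theorem count7Loop_eq (n : Nat) (t : Int) : count7Loop n t =
    if n = 0 then t else count7Loop (n / 10) (if n % 10 = 7 then t + 1 else t) := by
  rw [count7Loop]

theorem count7Loop_shift (m : Nat) : ∀ (t : Int), count7Loop m t = count7Loop m 0 + t := by
  induction m using Nat.strong_induction_on with
  | _ m ihm =>
    intro t
    by_cases hm : m = 0
    · subst hm; simp [count7Loop_eq 0]
    · have hlt := Nat.div_lt_self (Nat.pos_of_ne_zero hm) (by norm_num : 1 < 10)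
      rw [count7Loop_eq, count7Loop_eq m 0, if_neg hm, if_neg hm,
        ihm _ hlt, ihm _ hlt (if m % 10 = 7 then (0:Int) + 1 else 0)]
      split_ifs <;> ring

-- single-char count: PySem.Chars.count.go with sub = ['7'] counts occurrences of '7'
theorem go_count7 (l : List Char) : ∀ (fuel acc : Nat), l.length ≤ fuel →
    PySem.Chars.count.go ['7'] fuel l acc = acc + l.count '7' := by
  induction l with
  | nil => intro fuel acc _; cases fuel <;> simp [PySem.Chars.count.go]
  | cons h t ih =>
    intro fuel acc hf
    cases fuel with
    | zero => simp at hf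
    | succ n =>
      simp only [PySem.Chars.count.go]
      by_cases hh : h = '7'
      · subst hh
        simp [List.isPrefixOf, ih _ _ (Nat.le_of_succ_le_succ hf)]
        omega
      · simp [List.isPrefixOf, Ne.symm hh, ih _ _ (Nat.le_of_succ_le_succ hf), hh]

theorem chars_count7 (l : List Char) : PySem.Chars.count l ['7'] = l.count '7' := by
  simp [PySem.Chars.count, go_count7 l l.length 0 le_rfl]

theorem digitChar_eq_seven (d : Nat) (hd : d < 10) : (Nat.digitChar d = '7') ↔ d = 7 := by
  interval_cases d <;> simp [Nat.digitChar]

-- toDigitsCore's '7' count is the arithmetic digit-7 count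
theorem toDigitsCore_count7 : ∀ (fuel n : Nat) (acc : List Char), n < fuel →
    ((Nat.toDigitsCore 10 fuel n acc).count '7' : Int) =
      count7Loop n 0 + (acc.count '7' : Int) := by
  intro fuel
  induction fuel with
  | zero => intro n acc h; omega
  | succ f ih =>
    intro n acc h
    rw [Nat.toDigitsCore]
    have hlt10 : n % 10 < 10 := Nat.mod_lt _ (by norm_num)
    by_cases h0 : n / 10 = 0
    · rw [if_pos h0, count7Loop_eq]
      simp only [List.count_cons, beq_iff_eq]
      by_cases h7 : n % 10 = 7
      · have hd : Nat.digitChar (n % 10) = '7' := by rw [h7]; rfl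
        have hn : n ≠ 0 := by omega
        rw [if_pos hd, if_neg hn, h0, count7Loop_eq (0:Nat), if_pos rfl, if_pos h7]
        push_cast; ring
      · have hd : Nat.digitChar (n % 10) ≠ '7' := by
          simpa [digitChar_eq_seven _ hlt10] using h7
        rw [if_neg hd]
        by_cases hn : n = 0
        · rw [if_pos hn]; simp
        · rw [if_neg hn, h0, count7Loop_eq (0:Nat), if_pos rfl, if_neg h7]
          simp
    · rw [if_neg h0]
      have hn : n ≠ 0 := fun hz => h0 (by simp [hz])
      have hdiv : n / 10 < f := by
        have := Nat.div_lt_self (Nat.pos_of_ne_zero hn) (by norm_num : 1 < 10)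
        omega
      rw [ih _ _ hdiv, count7Loop_eq n 0, if_neg hn, count7Loop_shift]
      simp only [List.count_cons, beq_iff_eq]
      by_cases h7 : n % 10 = 7
      · have hd : Nat.digitChar (n % 10) = '7' := by rw [h7]; rfl
        rw [if_pos hd, if_pos h7, count7Loop_shift (n / 10) ((0:Int) + 1)]
        push_cast; ring
      · have hd : Nat.digitChar (n % 10) ≠ '7' := by
          simpa [digitChar_eq_seven _ hlt10] using h7
        rw [if_neg hd, if_neg h7]
        push_cast; ring

-- per-element: the '7'-count of str(x) equals the arithmetic count of |x|
theorem str_count7_eq (x : Int) :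
    (PySem.Str.count (PySem.Int.toStr x) "7" : Int) = count7Loop x.natAbs 0 := by
  have h7 : ("7" : String).toList = ['7'] := rfl
  rw [PySem.Str.count_eq, PySem.Int.toList_toStr, h7, PySem.Int.toChars]
  unfold Nat.toDigits
  by_cases hx : x < 0
  · rw [if_pos hx, chars_count7]
    simp only [List.count_cons, beq_iff_eq]
    rw [if_neg (by decide : ¬('-':Char) = '7')]
    have := toDigitsCore_count7 (x.natAbs + 1) x.natAbs [] (Nat.lt_succ_self _)
    simp only [List.count_nil, Nat.cast_zero, add_zero] at this
    rw [Nat.add_zero, this]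
  · rw [if_neg hx, chars_count7]
    have := toDigitsCore_count7 (x.toNat + 1) x.toNat [] (Nat.lt_succ_self _)
    simp at this ⊢
    rw [this]
    congr 1
    omega

-- both accumulations agree
theorem fold_eq (l : List Int) :
    List.foldl (fun a y => a + (PySem.Str.count (PySem.Int.toStr y) "7" : Int)) 0 l =
      List.foldl (fun total x => count7Loop x.natAbs total) 0 l := by
  induction l using List.reverseRecOn with
  | nil => rfl
  | append_singleton xs x ih =>
    rw [List.foldl_append, List.foldl_append, List.foldl_cons, List.foldl_nil,
      List.foldl_cons, List.foldl_nil, ih, str_count7_eq,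
      count7Loop_shift x.natAbs (List.foldl (fun total x => count7Loop x.natAbs total) 0 xs)]
    ring

-- ===== VERDICT (by name: the statement is the Claim_ definition above) =====
theorem solution_spec : Claim_equal_solution := by
  intro array _
  unfold Spec_solution solution solution_alt
  simp only [PySem.List.foldl_append_singleton_eq_map, List.nil_append, List.foldl_map]
  exact fold_eq array
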